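-- pv_equiv track=rewrite | github.com/ADP424/MusicRanker | imdb_import.py | compute_lead_actors
-- ===== SOURCE A (Python) =====
-- from typing import Any
--
-- def compute_lead_actors(cast_rows: list[dict[str, Any]]) -> set[int]:
--     """
--     Returns the set of TMDb person IDs that are lead actors for this title.
--
--     TMDb exposes cast billing order within the cast list via `order`. To stay
--     close to the IMDb importer behavior, we treat the top-billed cast members
--     as leads:
--       - take cast with order <= 2
--       - from those, take at most 2
--       - if none have an order, fall back to the first credited cast member
--     """
--     cleaned = [r for r in cast_rows if r.get("id") is not None]
--     if not cleaned:
--         return set()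
--
--     ordered = sorted(cleaned, key=lambda r: (r.get("order", 10_000), r.get("cast_id", 10_000)))
--     top_position_cast = [r for r in ordered if isinstance(r.get("order"), int) and r["order"] <= 2]
--     if top_position_cast:
--         return {int(r["id"]) for r in top_position_cast[:2]}
--     return {int(ordered[0]["id"])}
-- ===== SOURCE B (Python) =====
-- def compute_lead_actors(cast_rows):
--     """Single pass: track the two smallest top-billed entries by (order, cast_id)
--     and the overall minimum for the fallback, instead of sorting the whole cast
--     (a different algorithm, not claimed to be faster in wall-clock terms)."""
--     fb = None          # (key, id) with the smallest key among credited cast (fallback)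
--     b1 = None          # smallest (key, id) among top-billed (order <= 2) credited cast
--     b2 = None          # second smallest
--     for r in cast_rows:
--         rid = r.get("id")
--         if rid is None:
--             continue
--         key = (r.get("order", 10_000), r.get("cast_id", 10_000))
--         if fb is None or key < fb[0]:
--             fb = (key, rid)
--         order = r.get("order")
--         if isinstance(order, int) and order <= 2:
--             if b1 is None or key < b1[0]:
--                 b1, b2 = (key, rid), b1
--             elif b2 is None or key < b2[0]:
--                 b2 = (key, rid)
--     if b1 is not None:
--         leads = {int(b1[1])}
--         if b2 is not None:
--             leads.add(int(b2[1]))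
--         return leads
--     if fb is not None:
--         return {int(fb[1])}
--     return set()
-- ===== Notes on version B (the rewrite author's own statement) =====
-- stated objective: alternative
-- what changed: Replaces sort-the-whole-cast-then-filter with a single pass that keeps the two smallest top-billed entries by (order, cast_id) and the running minimum for the fallback; trades the O(n log n) sort for O(1) state per row at similar measured cost.
import Mathlib
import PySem

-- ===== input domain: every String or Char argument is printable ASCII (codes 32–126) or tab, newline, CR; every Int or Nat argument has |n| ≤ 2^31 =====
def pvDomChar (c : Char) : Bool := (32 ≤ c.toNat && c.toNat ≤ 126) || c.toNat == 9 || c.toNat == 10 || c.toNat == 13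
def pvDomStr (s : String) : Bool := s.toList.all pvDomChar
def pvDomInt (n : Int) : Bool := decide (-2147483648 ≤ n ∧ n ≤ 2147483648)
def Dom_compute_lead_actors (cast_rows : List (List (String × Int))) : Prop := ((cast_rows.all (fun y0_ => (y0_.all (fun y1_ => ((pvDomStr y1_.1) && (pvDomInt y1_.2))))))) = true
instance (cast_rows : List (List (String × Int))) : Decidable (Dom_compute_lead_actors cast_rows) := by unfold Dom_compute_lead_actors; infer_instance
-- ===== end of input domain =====

-- B replaces sort-then-filter by a single pass keeping the two smallest top-billed entries and the running minimum (objective: alternative algorithm; no argument mutation involved).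

-- shared row accessors (both Pythons read the dict the same way: r.get("id"), r.get("order", 10000), …)
def pvGetId? (r : List (String × Int)) : Option Int := (PySem.Dict.mk r).get? "id"
def pvOrdK (r : List (String × Int)) : Int := (PySem.Dict.mk r).getD "order" 10000
def pvCidK (r : List (String × Int)) : Int := (PySem.Dict.mk r).getD "cast_id" 10000
-- isinstance(r.get("order"), int) and r["order"] <= 2  (values are Int under the type convention)
def pvIsTop (r : List (String × Int)) : Bool :=
  match (PySem.Dict.mk r).get? "order" with
  | some o => decide (o ≤ 2)
  | none => false

-- ===== PORT A =====
def compute_lead_actors (cast_rows : List (List (String × Int))) : List Int :=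
  let cleaned := cast_rows.filter (fun r => (pvGetId? r).isSome)
  if cleaned.isEmpty then [] else
    let ordered := PySem.List.sorted2 cleaned pvOrdK pvCidK
    let top := ordered.filter pvIsTop
    if top.isEmpty then
      match ordered with
      | [] => []           -- unreachable: cleaned ≠ []
      | r :: _ => PySem.Set.ofList [(pvGetId? r).getD 0]
    else
      PySem.Set.ofList ((top.take 2).map (fun r => (pvGetId? r).getD 0))

-- ===== PORT B =====
-- Python tuple comparison key < other_key, lexicographic on (order, cast_id)
def pvLtKey (k l : Int × Int) : Bool := decide (k.1 < l.1) || (k.1 == l.1 && decide (k.2 < l.2))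

-- one loop iteration of Source B: state = (fb, b1, b2), each an optional (key, id)
def pvStepB (s : Option ((Int × Int) × Int) × Option ((Int × Int) × Int) × Option ((Int × Int) × Int))
    (r : List (String × Int)) :
    Option ((Int × Int) × Int) × Option ((Int × Int) × Int) × Option ((Int × Int) × Int) :=
  match pvGetId? r with
  | none => s
  | some rid =>
    let key := (pvOrdK r, pvCidK r)
    let fb : Option ((Int × Int) × Int) :=
      match s.1 with
      | none => some (key, rid)
      | some f => if pvLtKey key f.1 then some (key, rid) else some f
    let bs : Option ((Int × Int) × Int) × Option ((Int × Int) × Int) :=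
      if pvIsTop r then
        match s.2.1 with
        | none => (some (key, rid), none)
        | some b1 =>
          if pvLtKey key b1.1 then (some (key, rid), some b1)
          else
            match s.2.2 with
            | none => (some b1, some (key, rid))
            | some b2 => if pvLtKey key b2.1 then (some b1, some (key, rid)) else (some b1, some b2)
      else s.2
    (fb, bs)

def compute_lead_actors_alt (cast_rows : List (List (String × Int))) : List Int :=
  let s := cast_rows.foldl pvStepB (none, none, none)
  match s.2.1 with
  | some b1 =>
    match s.2.2 with
    | some b2 => PySem.Set.add (PySem.Set.ofList [b1.2]) b2.2
    | none => PySem.Set.ofList [b1.2]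
  | none =>
    match s.1 with
    | some f => PySem.Set.ofList [f.2]
    | none => []

-- ===== PRECONDITION & SPEC =====
def Spec_compute_lead_actors (cast_rows : List (List (String × Int))) (out : List Int) : Prop := out = compute_lead_actors_alt cast_rows
instance (cast_rows : List (List (String × Int))) (out : List Int) : Decidable (Spec_compute_lead_actors cast_rows out) := by unfold Spec_compute_lead_actors; infer_instance

-- ===== CLAIM (what is proved, stated in full; the proofs are below) =====
def Claim_equal_compute_lead_actors : Prop := ∀ (cast_rows : List (List (String × Int))), Dom_compute_lead_actors cast_rows → Spec_compute_lead_actors cast_rows (compute_lead_actors cast_rows)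

-- ===== LEMMAS AND PROOFS =====

-- the comparator sorted2 uses, as a relation between rows
def ltRow (a b : List (String × Int)) : Bool :=
  decide (pvOrdK a < pvOrdK b) || (!decide (pvOrdK b < pvOrdK a) && decide (pvCidK a < pvCidK b))

def sortR (xs : List (List (String × Int))) : List (List (String × Int)) :=
  xs.foldl (fun acc x => PySem.List.insertBy ltRow x acc) []

lemma sorted2_eq_sortR (xs : List (List (String × Int))) :
    PySem.List.sorted2 xs pvOrdK pvCidK = sortR xs := rfl

lemma ltRow_iff (a b : List (String × Int)) :
    ltRow a b = true ↔ (pvOrdK a < pvOrdK b ∨ (pvOrdK a = pvOrdK b ∧ pvCidK a < pvCidK b)) := by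
  simp [ltRow]; omega

lemma pvLtKey_iff (k l : Int × Int) :
    pvLtKey k l = true ↔ (k.1 < l.1 ∨ (k.1 = l.1 ∧ k.2 < l.2)) := by
  simp [pvLtKey]

lemma ltKey_eq (a b : List (String × Int)) :
    pvLtKey (pvOrdK a, pvCidK a) (pvOrdK b, pvCidK b) = ltRow a b := by
  rw [Bool.eq_iff_iff, pvLtKey_iff, ltRow_iff]

lemma ltRow_trans {a b c : List (String × Int)} (h1 : ltRow a b = true) (h2 : ltRow b c = true) :
    ltRow a c = true := by
  rw [ltRow_iff] at *; omega

lemma ltRow_cross {a b c : List (String × Int)} (h1 : ltRow a b = true) (h2 : ltRow c b = false) :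
    ltRow a c = true := by
  rw [Bool.eq_false_iff, ne_eq, ltRow_iff] at h2
  rw [ltRow_iff] at *
  omega

lemma ltRow_asymm {a b : List (String × Int)} (h : ltRow a b = true) : ltRow b a = false := by
  rw [ltRow_iff] at h
  rw [Bool.eq_false_iff, ne_eq, ltRow_iff]
  omega

def SortedAcc (l : List (List (String × Int))) : Prop :=
  l.Pairwise (fun a b => ltRow b a = false)

lemma insertBy_nil (x : List (String × Int)) : PySem.List.insertBy ltRow x [] = [x] := rfl

lemma insertBy_cons (x y : List (String × Int)) (ys : List (List (String × Int))) :
    PySem.List.insertBy ltRow x (y :: ys) =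
      if ltRow x y then x :: y :: ys else y :: PySem.List.insertBy ltRow x ys := rfl

lemma insert_sorted {l : List (List (String × Int))} (x : List (String × Int))
    (h : SortedAcc l) : SortedAcc (PySem.List.insertBy ltRow x l) := by
  induction l with
  | nil => simp [insertBy_nil, SortedAcc]
  | cons y ys ih =>
    rw [SortedAcc, List.pairwise_cons] at h
    obtain ⟨hy, hys⟩ := h
    rw [insertBy_cons]
    by_cases hxy : ltRow x y = true
    · rw [if_pos hxy]
      refine List.Pairwise.cons ?_ (List.Pairwise.cons hy hys)
      intro z hz
      rcases List.mem_cons.mp hz with rfl | hz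
      · exact ltRow_asymm hxy
      · by_contra hc
        rw [Bool.not_eq_false] at hc
        have := ltRow_trans hc hxy
        rw [hy z hz] at this
        exact absurd this (by simp)
    · rw [if_neg hxy]
      rw [Bool.not_eq_true] at hxy
      refine List.Pairwise.cons ?_ (ih hys)
      intro z hz
      rcases (PySem.List.mem_insertBy ltRow x z ys).mp hz with rfl | hz
      · exact hxy
      · exact hy z hz

lemma filter_insert (p : List (String × Int) → Bool) {l : List (List (String × Int))}
    (x : List (String × Int)) (h : SortedAcc l) :
    (PySem.List.insertBy ltRow x l).filter p =
      if p x then PySem.List.insertBy ltRow x (l.filter p) else l.filter p := by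
  induction l with
  | nil => cases hpx : p x <;> simp [insertBy_nil, hpx, List.filter]
  | cons y ys ih =>
    rw [SortedAcc, List.pairwise_cons] at h
    obtain ⟨hy, hys⟩ := h
    rw [insertBy_cons]
    by_cases hxy : ltRow x y = true
    · rw [if_pos hxy]
      cases hpx : p x with
      | false => simp [List.filter_cons, hpx]
      | true =>
        have hstep : PySem.List.insertBy ltRow x ((y :: ys).filter p) = x :: (y :: ys).filter p := by
          cases hc : (y :: ys).filter p with
          | nil => rw [insertBy_nil]
          | cons a t =>
            have ha : a ∈ (y :: ys).filter p := by rw [hc]; exact List.mem_cons_self ..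
            have hmem := (List.mem_filter.mp ha).1
            have hlt : ltRow x a = true := by
              rcases List.mem_cons.mp hmem with rfl | hmm
              · exact hxy
              · exact ltRow_cross hxy (hy _ hmm)
            rw [insertBy_cons, if_pos hlt]
        simp only [if_pos rfl]
        rw [hstep]
        simp [List.filter_cons, hpx]
    · rw [if_neg hxy]
      rw [Bool.not_eq_true] at hxy
      have hihys := ih hys
      cases hpy : p y <;> cases hpx : p x <;>
        simp_all [List.filter_cons, insertBy_cons]

lemma sortR_append (xs : List (List (String × Int))) (x : List (String × Int)) :
    sortR (xs ++ [x]) = PySem.List.insertBy ltRow x (sortR xs) := by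
  simp [sortR, List.foldl_append]

lemma sortR_sorted (xs : List (List (String × Int))) : SortedAcc (sortR xs) := by
  induction xs using List.reverseRecOn with
  | nil => simp [sortR, SortedAcc]
  | append_singleton xs x ih => rw [sortR_append]; exact insert_sorted x ih

lemma filter_sortR (p : List (String × Int) → Bool) (xs : List (List (String × Int))) :
    (sortR xs).filter p = sortR (xs.filter p) := by
  induction xs using List.reverseRecOn with
  | nil => simp [sortR]
  | append_singleton xs x ih =>
    rw [sortR_append, filter_insert p x (sortR_sorted xs), List.filter_append]
    by_cases hp : p x = true
    · simp [hp, sortR_append, ih]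
    · rw [Bool.not_eq_true] at hp
      simp [hp, ih]

lemma length_insertBy (x : List (String × Int)) (l : List (List (String × Int))) :
    (PySem.List.insertBy ltRow x l).length = l.length + 1 := by
  induction l with
  | nil => rfl
  | cons y ys ih =>
    rw [insertBy_cons]
    by_cases h : ltRow x y = true <;> simp [h, ih]

lemma sortR_eq_nil_iff (xs : List (List (String × Int))) : sortR xs = [] ↔ xs = [] := by
  induction xs using List.reverseRecOn with
  | nil => simp [sortR]
  | append_singleton xs x ih =>
    rw [sortR_append]
    constructor
    · intro h
      have := length_insertBy x (sortR xs)
      rw [h] at this; simp at this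
    · intro h; simp at h

-- first two elements of a list
def to2 (l : List (List (String × Int))) : Option (List (String × Int)) × Option (List (String × Int)) :=
  match l with
  | [] => (none, none)
  | [a] => (some a, none)
  | a :: b :: _ => (some a, some b)

lemma to2_insert (x : List (String × Int)) (l : List (List (String × Int))) :
    to2 (PySem.List.insertBy ltRow x l) =
      match to2 l with
      | (none, _) => (some x, none)
      | (some a, ob) =>
        if ltRow x a then (some x, some a)
        else
          match ob with
          | none => (some a, some x)
          | some b => if ltRow x b then (some a, some x) else (some a, some b) := by
  match l with
  | [] => rfl
  | [a] =>
    rw [insertBy_cons]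
    by_cases h : ltRow x a = true <;> simp [h, to2, insertBy_nil]
  | a :: b :: t =>
    rw [insertBy_cons]
    by_cases h1 : ltRow x a = true
    · simp [h1, to2]
    · by_cases h2 : ltRow x b = true <;> simp [h1, h2, to2, insertBy_cons]

-- abstraction of a row into the (key, id) pair that B carries
def mAbs (r : List (String × Int)) : (Int × Int) × Int := ((pvOrdK r, pvCidK r), (pvGetId? r).getD 0)
def pP (r : List (String × Int)) : Bool := (pvGetId? r).isSome
def pT (r : List (String × Int)) : Bool := pP r && pvIsTop r

lemma filter_pT (xs : List (List (String × Int))) :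
    (xs.filter pP).filter pvIsTop = xs.filter pT := by
  induction xs with
  | nil => rfl
  | cons a t ih =>
    cases hP : pP a <;> cases hT : pvIsTop a <;>
      simp [List.filter_cons, hP, hT, pT, ih]

lemma to2_nil : to2 [] = (none, none) := rfl

lemma to2_cons_fst (a : List (String × Int)) (l : List (List (String × Int))) :
    (to2 (a :: l)).1 = some a := by cases l <;> rfl

lemma to2_cons_snd (a : List (String × Int)) (l : List (List (String × Int))) :
    (to2 (a :: l)).2 = l.head? := by cases l <;> rfl

set_option maxRecDepth 4000 in
lemma fold_inv (xs : List (List (String × Int))) :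
    xs.foldl pvStepB (none, none, none) =
      (Option.map mAbs (to2 (sortR (xs.filter pP))).1,
       Option.map mAbs (to2 (sortR (xs.filter pT))).1,
       Option.map mAbs (to2 (sortR (xs.filter pT))).2) := by
  induction xs using List.reverseRecOn with
  | nil => rfl
  | append_singleton xs r ih =>
    rw [List.foldl_append, ih, List.foldl_cons, List.foldl_nil, List.filter_append,
      List.filter_append]
    cases hid : pvGetId? r with
    | none =>
      have hP : pP r = false := by simp [pP, hid]
      have hT : pT r = false := by simp [pT, hP]
      simp [pvStepB, hid, List.filter_cons, hP, hT]
    | some rid =>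
      have hP : pP r = true := by simp [pP, hid]
      have hrid : rid = (pvGetId? r).getD 0 := by rw [hid]; rfl
      have e1 : List.filter pP [r] = [r] := by simp [hP]
      by_cases hT : pvIsTop r
      · have hT' : pT r = true := by simp [pT, hP, hT]
        have e2 : List.filter pT [r] = [r] := by simp [hT']
        rw [e1, e2, sortR_append, sortR_append, to2_insert, to2_insert]
        rcases hA1 : to2 (sortR (xs.filter pP)) with ⟨o1, o2⟩
        rcases hA2 : to2 (sortR (xs.filter pT)) with ⟨o3, o4⟩
        cases o1 <;> cases o2 <;> cases o3 <;> cases o4 <;>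
          simp only [pvStepB, hid, hT, if_true, mAbs, ltKey_eq, ← hrid, Option.map] <;>
          (try split_ifs) <;> simp [mAbs, ← hrid]
      · have hTf : pvIsTop r = false := by rwa [Bool.not_eq_true] at hT
        have hT' : pT r = false := by simp [pT, hTf]
        have e2 : List.filter pT [r] = [] := by simp [hT']
        rw [e1, e2, List.append_nil, sortR_append, to2_insert]
        rcases hA1 : to2 (sortR (xs.filter pP)) with ⟨o1, o2⟩
        cases o1 <;> cases o2 <;>
          simp only [pvStepB, hid, hTf, Bool.false_eq_true, if_false, mAbs, ltKey_eq, ← hrid,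
            Option.map] <;>
          (try split_ifs) <;> simp [mAbs, ← hrid]

lemma set_two (a b : Int) :
    PySem.Set.ofList [a, b] = PySem.Set.add (PySem.Set.ofList [a]) b := by
  rw [PySem.Set.ofList_eq_foldl, PySem.Set.ofList_eq_foldl]
  rfl

-- ===== VERDICT (by name: the statement is the Claim_ definition above) =====
theorem compute_lead_actors_spec : Claim_equal_compute_lead_actors := by
  intro xs _hdom
  unfold Spec_compute_lead_actors compute_lead_actors compute_lead_actors_alt
  rw [fold_inv]
  simp only [show (fun r => (pvGetId? r).isSome) = pP from rfl, sorted2_eq_sortR]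
  have htop : (sortR (xs.filter pP)).filter pvIsTop = sortR (xs.filter pT) := by
    rw [filter_sortR, filter_pT]
  by_cases hcl : xs.filter pP = []
  · have htT : xs.filter pT = [] := by rw [← filter_pT, hcl]; rfl
    simp [hcl, htT, sortR, to2]
  · have hne : sortR (xs.filter pP) ≠ [] := by rw [Ne, sortR_eq_nil_iff]; exact hcl
    cases hsp : sortR (xs.filter pP) with
    | nil => exact absurd hsp hne
    | cons y ys =>
      rw [hsp] at htop
      cases hst : sortR (xs.filter pT) with
      | nil =>
        rw [hst] at htop
        simp [hsp, hst, htop, hcl, to2_nil, to2_cons_fst, to2_cons_snd, mAbs, List.isEmpty_iff]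
      | cons t1 ts =>
        rw [hst] at htop
        cases ts with
        | nil =>
          simp [hsp, hst, htop, hcl, to2_nil, to2_cons_fst, to2_cons_snd, mAbs, List.isEmpty_iff]
        | cons t2 ts' =>
          simp [hsp, hst, htop, hcl, to2_nil, to2_cons_fst, to2_cons_snd, mAbs,
            List.isEmpty_iff, set_two]
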